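-- pv_equiv track=rewrite | github.com/hangjoo/backjoon | Python/2630.py | check
-- ===== SOURCE A (Python) =====
-- def check(paper):
--     flag = paper[0][0]
--     for i in paper:
--         for j in i:
--             if j != flag:
--                 return -1
--     if flag == 1:
--         return 1
--     else:
--         return 0
-- ===== SOURCE B (Python) =====
-- def check(paper):
--     cells = [v for row in paper for v in row]
--     lo, hi = min(cells), max(cells)
--     if lo != hi:
--         return -1
--     return 1 if lo == 1 else 0
-- ===== Notes on version B (the rewrite author's own statement) =====
-- stated objective: alternative
-- what changed: B decides uniformity from order statistics: it reduces all cells to their minimum and maximum and returns -1 iff min != max, deciding the 1/0 result from the minimum, instead of A's early-return double scan comparing every cell against the top-left cell.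
import Mathlib
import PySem

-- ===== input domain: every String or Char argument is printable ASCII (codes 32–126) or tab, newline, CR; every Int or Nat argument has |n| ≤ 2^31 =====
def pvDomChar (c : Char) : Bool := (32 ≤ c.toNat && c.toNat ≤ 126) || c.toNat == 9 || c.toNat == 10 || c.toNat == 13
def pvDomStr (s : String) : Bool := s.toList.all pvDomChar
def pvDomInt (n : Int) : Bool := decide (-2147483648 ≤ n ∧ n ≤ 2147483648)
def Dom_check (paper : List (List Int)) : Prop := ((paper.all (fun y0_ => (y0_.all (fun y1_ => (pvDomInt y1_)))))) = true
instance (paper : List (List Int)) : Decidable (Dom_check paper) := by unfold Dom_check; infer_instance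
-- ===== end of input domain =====

-- B decides uniformity by order statistics (min/max of all cells) instead of A's early-return scan against the top-left cell.

-- ===== PORT A =====
-- inner 'for j in i' loop: some (-1) = early return, none = fell through
def checkRow (flag : Int) : List Int → Option Int
  | [] => none
  | j :: rest => if j ≠ flag then some (-1) else checkRow flag rest

-- outer 'for i in paper' loop
def checkRows (flag : Int) : List (List Int) → Option Int
  | [] => none
  | i :: rest =>
    match checkRow flag i with
    | some r => some r
    | none => checkRows flag rest

def check (paper : List (List Int)) : Int :=
  match PySem.List.pyGet? paper 0 with
  | none => 0  -- IndexError, excluded by Pre_check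
  | some row0 =>
    match PySem.List.pyGet? row0 0 with
    | none => 0  -- IndexError, excluded by Pre_check
    | some flag =>
      match checkRows flag paper with
      | some r => r
      | none => if flag = 1 then 1 else 0

-- ===== PORT B =====
def check_alt (paper : List (List Int)) : Int :=
  let cells := paper.flatMap (fun row => row)
  match PySem.List.min? cells (fun x => x), PySem.List.max? cells (fun x => x) with
  | some lo, some hi => if lo ≠ hi then -1 else if lo = 1 then 1 else 0
  | _, _ => 0  -- ValueError on min/max of empty sequence, excluded by Pre_check

-- ===== PRECONDITION & SPEC =====
-- Pre_check excludes exactly the inputs where A's 'paper[0][0]' raises IndexError: empty grid or empty first row.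
def Pre_check (paper : List (List Int)) : Prop := paper ≠ [] ∧ paper.headI ≠ []
instance (paper : List (List Int)) : Decidable (Pre_check paper) := by unfold Pre_check; infer_instance
def pvWitness_check : List (List Int) := [[1, 1], [1, 1]]

def Spec_check (paper : List (List Int)) (out : Int) : Prop := out = check_alt paper
instance (paper : List (List Int)) (out : Int) : Decidable (Spec_check paper out) := by unfold Spec_check; infer_instance

-- ===== CLAIM (what is proved, stated in full; the proofs are below) =====
def Claim_equal_check : Prop := ∀ (paper : List (List Int)), Dom_check paper → Pre_check paper → Spec_check paper (check paper)

-- ===== LEMMAS AND PROOFS =====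

lemma checkRow_eq (f : Int) (l : List Int) :
    checkRow f l = if ∀ j ∈ l, j = f then none else some (-1) := by
  induction l with
  | nil => simp [checkRow]
  | cons a t ih =>
    simp only [checkRow, ih]
    by_cases ha : a = f <;> by_cases ht : ∀ j ∈ t, j = f <;> simp_all

lemma checkRows_eq (f : Int) (p : List (List Int)) :
    checkRows f p = if ∀ i ∈ p, ∀ j ∈ i, j = f then none else some (-1) := by
  induction p with
  | nil => simp [checkRows]
  | cons a t ih =>
    simp only [checkRows, checkRow_eq, ih, List.forall_mem_cons]
    by_cases ha : ∀ j ∈ a, j = f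
    · by_cases ht : ∀ i ∈ t, ∀ j ∈ i, j = f
      · rw [if_pos ha, if_pos ht, if_pos ⟨ha, ht⟩]
      · have hc : ¬ ((∀ j ∈ a, j = f) ∧ ∀ i ∈ t, ∀ j ∈ i, j = f) := fun h => ht h.2
        rw [if_pos ha, if_neg ht, if_neg hc]
    · have hc : ¬ ((∀ j ∈ a, j = f) ∧ ∀ i ∈ t, ∀ j ∈ i, j = f) := fun h => ha h.1
      rw [if_neg ha, if_neg hc]

-- ===== VERDICT (by name: the statement is the Claim_ definition above) =====
theorem check_spec : Claim_equal_check := by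
  intro paper _ hpre
  obtain ⟨hne, hrow⟩ := hpre
  obtain ⟨row0, rest, rfl⟩ : ∃ r rs, paper = r :: rs := by
    cases paper with
    | nil => exact absurd rfl hne
    | cons r rs => exact ⟨r, rs, rfl⟩
  obtain ⟨f, r0, rfl⟩ : ∃ f r0, row0 = f :: r0 := by
    cases row0 with
    | nil => simp at hrow
    | cons f r0 => exact ⟨f, r0, rfl⟩
  have hflat : ((f :: r0) :: rest).flatMap (fun row => row) = f :: (r0 ++ rest.flatten) := by
    simp [List.flatMap]
  unfold Spec_check check check_alt
  simp only [PySem.List.pyGet?, PySem.List.pyIdx?, hflat]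
  norm_num
  rw [checkRows_eq]
  -- min? and max? of the nonempty cell list are some
  obtain ⟨lo, hlo⟩ : ∃ lo, PySem.List.min? (f :: (r0 ++ rest.flatten)) (fun x => x) = some lo := by
    cases h : PySem.List.min? (f :: (r0 ++ rest.flatten)) (fun x => x) with
    | none => exact absurd ((PySem.List.min?_eq_none_iff _ _).mp h) (by simp)
    | some lo => exact ⟨lo, rfl⟩
  obtain ⟨hi, hhi⟩ : ∃ hi, PySem.List.max? (f :: (r0 ++ rest.flatten)) (fun x => x) = some hi := by
    cases h : PySem.List.max? (f :: (r0 ++ rest.flatten)) (fun x => x) with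
    | none => exact absurd ((PySem.List.max?_eq_none_iff _ _).mp h) (by simp)
    | some hi => exact ⟨hi, rfl⟩
  rw [hlo, hhi]
  have hlomem : lo ∈ f :: (r0 ++ rest.flatten) := PySem.List.min?_mem hlo
  have hlomin : ∀ y ∈ f :: (r0 ++ rest.flatten), lo ≤ y := PySem.List.min?_isMin hlo
  have hhimax : ∀ y ∈ f :: (r0 ++ rest.flatten), y ≤ hi := PySem.List.max?_isMax hhi
  have hmemflat : ∀ i ∈ (f :: r0) :: rest, ∀ j ∈ i, j ∈ f :: (r0 ++ rest.flatten) := by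
    intro i hi' j hj
    rw [← hflat]
    exact List.mem_flatMap.mpr ⟨i, hi', hj⟩
  by_cases hall : ∀ i ∈ (f :: r0) :: rest, ∀ j ∈ i, j = f
  · -- all cells equal f: lo = hi = f
    have hallf : ∀ x ∈ f :: (r0 ++ rest.flatten), x = f := by
      intro x hx
      rw [← hflat] at hx
      obtain ⟨row, hr, hxr⟩ := List.mem_flatMap.mp hx
      exact hall row hr x hxr
    have hlof : lo = f := hallf lo hlomem
    have hhif : hi = f := hallf hi (PySem.List.max?_mem hhi)
    rw [if_pos hall]
    simp [hlof, hhif]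
  · -- some cell differs from f: lo < hi, both sides return -1
    rw [if_neg hall]
    push Not at hall
    obtain ⟨i, hi', j, hj, hjf⟩ := hall
    have hjmem : j ∈ f :: (r0 ++ rest.flatten) := hmemflat i hi' j hj
    have hfmem : f ∈ f :: (r0 ++ rest.flatten) := by simp
    have hlh : lo ≠ hi := by
      intro he
      have h1 := hlomin j hjmem
      have h2 := hhimax j hjmem
      have h3 := hlomin f hfmem
      have h4 := hhimax f hfmem
      exact hjf (by omega)
    simp [hlh]
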